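-- pv_equiv track=rewrite | github.com/OmkarSharan/Spoj | Coins.py | solve
-- ===== SOURCE A (Python) =====
-- max_values = {}
--
-- def solve(n):
--     sol = n
--
--     if n in max_values:
--         sol = max_values[n]
--     else:
--         if not n == 0:
--             coin1 = solve(int(n/2))
--             coin2 = solve(int(n/3))
--             coin3 = solve(int(n/4))
--
--             sol = max(n, coin1 + coin2 + coin3)
--             max_values[n] = sol
--
--     return sol
-- ===== SOURCE B (Python) =====
-- def solve(n):
--     # Bottom-up DP over the reachable values n // (2**a * 3**b) instead of
--     # top-down memoized recursion; for n < 12 the answer is max(n, 0) directly.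
--     if n < 12:
--         return max(n, 0)
--     vals = sorted({n // (2 ** a * 3 ** b)
--                    for a in range(64) for b in range(64)
--                    if n // (2 ** a * 3 ** b) > 0})
--     f = {}
--     for v in vals:
--         f[v] = v if v < 12 else f[v // 2] + f[v // 3] + f[v // 4]
--     return f[n]
-- ===== Notes on version B (the rewrite author's own statement) =====
-- stated objective: alternative
-- what changed: Replaces A's top-down memoized recursion (global dict) by a bottom-up DP: enumerate the set of reachable values n // (2^a * 3^b), sort it, and fill a table in increasing order, with the closed base case max(n, 0) for all n < 12.
import Mathlib
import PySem

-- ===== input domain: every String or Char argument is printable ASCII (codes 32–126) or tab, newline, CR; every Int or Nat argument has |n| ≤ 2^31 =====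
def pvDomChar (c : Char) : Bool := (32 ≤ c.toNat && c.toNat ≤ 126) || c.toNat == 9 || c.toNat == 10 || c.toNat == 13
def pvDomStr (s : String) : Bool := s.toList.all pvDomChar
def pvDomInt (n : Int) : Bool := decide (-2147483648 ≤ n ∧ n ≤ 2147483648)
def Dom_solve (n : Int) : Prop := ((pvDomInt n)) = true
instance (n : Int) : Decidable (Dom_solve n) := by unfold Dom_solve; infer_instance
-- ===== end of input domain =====

-- B replaces A's top-down memoized recursion by a bottom-up DP over the set of
-- reachable values n // (2^a * 3^b), with the closed base case max(n, 0) for n < 12.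
-- A's global memo dict only ever stores correct optima, so a single call's return
-- value does not depend on earlier calls; the port threads a memo through one call.

-- ===== PORT A =====
-- Python's int(n/k) truncates toward zero; for |n| ≤ 2^31 the float quotient n/k
-- (k = 2,3,4) never rounds across an integer, so int(n/k) = Int.tdiv n k exactly.
def solveA (n : Int) (memo : PySem.Dict Int Int) : Int × PySem.Dict Int Int :=
  match memo.get? n with
  | some v => (v, memo)                         -- sol = max_values[n]
  | none =>
    if _h : n = 0 then (n, memo)                -- sol = n, nothing stored
    else
      let r1 := solveA (n.tdiv 2) memo          -- coin1 = solve(int(n/2))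
      let r2 := solveA (n.tdiv 3) r1.2          -- coin2 = solve(int(n/3))
      let r3 := solveA (n.tdiv 4) r2.2          -- coin3 = solve(int(n/4))
      let sol := max n (r1.1 + r2.1 + r3.1)
      (sol, r3.2.insert n sol)                  -- max_values[n] = sol
termination_by n.natAbs
decreasing_by
  all_goals rw [Int.natAbs_tdiv]; exact Nat.div_lt_self (Int.natAbs_pos.mpr _h) (by decide)

def solve (n : Int) : Int := (solveA n PySem.Dict.empty).1

-- ===== PORT B =====
def solve_alt (n : Int) : Int :=
  if n < 12 then max n 0
  else
    -- {n // (2**a * 3**b) for a in range(64) for b in range(64) if … > 0}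
    let cand := (PySem.List.pyRange 0 64 1).flatMap (fun a =>
      (PySem.List.pyRange 0 64 1).filterMap (fun b =>
        let q := PySem.Int.floordiv n (2 ^ a.toNat * 3 ^ b.toNat)
        if 0 < q then some q else none))
    let vals := PySem.List.sorted (PySem.Set.ofList cand) (fun x => x) false
    let f := vals.foldl (fun d v =>
      d.insert v (if v < 12 then v
        else d.getD (PySem.Int.floordiv v 2) 0 + d.getD (PySem.Int.floordiv v 3) 0
             + d.getD (PySem.Int.floordiv v 4) 0)) PySem.Dict.empty
    f.getD n 0   -- f[n]; n is always a key (n = n // (2^0 * 3^0) > 0), default unused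

-- ===== PRECONDITION & SPEC =====
def Spec_solve (n : Int) (out : Int) : Prop := out = solve_alt n
instance (n : Int) (out : Int) : Decidable (Spec_solve n out) := by unfold Spec_solve; infer_instance

-- ===== CLAIM (what is proved, stated in full; the proofs are below) =====
def Claim_equal_solve : Prop := ∀ (n : Int), Dom_solve n → Spec_solve n (solve n)

-- ===== LEMMAS AND PROOFS =====

-- Reference function: the Bytelandian coin optimum, in closed bottom-up form.
def F (n : Int) : Int :=
  if n < 12 then max n 0
  else F (n / 2) + F (n / 3) + F (n / 4)
termination_by n.toNat
decreasing_by all_goals omega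

theorem F_ge (n : Int) : n ≤ F n ∧ 0 ≤ F n := by
  rw [F]
  split_ifs with h
  · omega
  · have i2 := F_ge (n / 2)
    have i3 := F_ge (n / 3)
    have i4 := F_ge (n / 4)
    omega
termination_by n.toNat
decreasing_by all_goals omega

theorem F_small {n : Int} (h : n < 12) : F n = max n 0 := by rw [F, if_pos h]

theorem tdiv_neg_case (n : Int) (k : Int) (hn : n < 0) : n.tdiv k = -((-n) / k) := by
  rw [← Int.tdiv_eq_ediv_of_nonneg (by omega : (0:Int) ≤ -n), ← Int.neg_tdiv, neg_neg]

theorem F_tdiv (n : Int) :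
    F n = if n = 0 then 0 else max n (F (n.tdiv 2) + F (n.tdiv 3) + F (n.tdiv 4)) := by
  rcases lt_trichotomy n 0 with hneg | rfl | hpos
  · rw [if_neg (by omega)]
    have e2 := tdiv_neg_case n 2 hneg
    have e3 := tdiv_neg_case n 3 hneg
    have e4 := tdiv_neg_case n 4 hneg
    rw [F_small (by omega), F_small (by omega : n.tdiv 2 < 12),
        F_small (by omega : n.tdiv 3 < 12), F_small (by omega : n.tdiv 4 < 12)]
    omega
  · simp [F_small, show ((0:Int) < 12) by norm_num]
  · rw [if_neg (by omega)]
    have t2 : n.tdiv 2 = n / 2 := Int.tdiv_eq_ediv_of_nonneg (by omega)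
    have t3 : n.tdiv 3 = n / 3 := Int.tdiv_eq_ediv_of_nonneg (by omega)
    have t4 : n.tdiv 4 = n / 4 := Int.tdiv_eq_ediv_of_nonneg (by omega)
    rw [t2, t3, t4]
    by_cases h12 : n < 12
    · rw [F_small h12, F_small (by omega : n / 2 < 12),
          F_small (by omega : n / 3 < 12), F_small (by omega : n / 4 < 12)]
      omega
    · have g2 := F_ge (n / 2)
      have g3 := F_ge (n / 3)
      have g4 := F_ge (n / 4)
      rw [F, if_neg h12]
      omega

def MemoInv (d : PySem.Dict Int Int) : Prop := ∀ k v, d.get? k = some v → v = F k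

theorem solveA_correct (n : Int) (memo : PySem.Dict Int Int) (h : MemoInv memo) :
    (solveA n memo).1 = F n ∧ MemoInv (solveA n memo).2 := by
  rw [solveA]
  cases hm : memo.get? n with
  | some v => exact ⟨h n v hm, h⟩
  | none =>
    by_cases h0 : n = 0
    · simp only [dif_pos h0]
      subst h0
      exact ⟨by rw [F_small (by norm_num)]; omega, h⟩
    · simp only [dif_neg h0]
      have I1 := solveA_correct (n.tdiv 2) memo h
      have I2 := solveA_correct (n.tdiv 3) (solveA (n.tdiv 2) memo).2 I1.2
      have I3 := solveA_correct (n.tdiv 4) (solveA (n.tdiv 3) (solveA (n.tdiv 2) memo).2).2 I2.2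
      have hF : max n ((solveA (n.tdiv 2) memo).1
          + (solveA (n.tdiv 3) (solveA (n.tdiv 2) memo).2).1
          + (solveA (n.tdiv 4) (solveA (n.tdiv 3) (solveA (n.tdiv 2) memo).2).2).1) = F n := by
        rw [I1.1, I2.1, I3.1, F_tdiv n, if_neg h0]
      refine ⟨hF, ?_⟩
      intro k v hk
      rw [PySem.Dict.get?_insert] at hk
      split at hk
      · rename_i hkn
        subst hkn
        rw [← hF]
        exact (Option.some.injEq _ _).mp hk |>.symm
      · exact I3.2 k v hk
termination_by n.natAbs
decreasing_by all_goals (rw [Int.natAbs_tdiv]; exact Nat.div_lt_self (Int.natAbs_pos.mpr h0) (by decide))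

-- Proof-side names for the pieces of solve_alt (definitionally the same terms).
def candOf (n : Int) : List Int :=
  (PySem.List.pyRange 0 64 1).flatMap (fun a =>
    (PySem.List.pyRange 0 64 1).filterMap (fun b =>
      let q := PySem.Int.floordiv n (2 ^ a.toNat * 3 ^ b.toNat)
      if 0 < q then some q else none))

def valsOf (n : Int) : List Int :=
  PySem.List.sorted (PySem.Set.ofList (candOf n)) (fun x => x) false

def stepD (d : PySem.Dict Int Int) (v : Int) : PySem.Dict Int Int :=
  d.insert v (if v < 12 then v
    else d.getD (PySem.Int.floordiv v 2) 0 + d.getD (PySem.Int.floordiv v 3) 0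
         + d.getD (PySem.Int.floordiv v 4) 0)

theorem solve_alt_unfold (n : Int) (h : ¬ n < 12) :
    solve_alt n = ((valsOf n).foldl stepD PySem.Dict.empty).getD n 0 := by
  rw [solve_alt, if_neg h]
  rfl

theorem pow23_pos (A B : Nat) : (0 : Int) < 2 ^ A * 3 ^ B := by positivity

theorem mem_cand (n v : Int) :
    v ∈ candOf n ↔ ∃ A B : Nat, A < 64 ∧ B < 64 ∧
      0 < n / ((2:Int) ^ A * 3 ^ B) ∧ v = n / ((2:Int) ^ A * 3 ^ B) := by
  constructor
  · intro hv
    rw [candOf, List.mem_flatMap] at hv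
    obtain ⟨a, ha, hv⟩ := hv
    rw [List.mem_filterMap] at hv
    obtain ⟨b, hb, hv⟩ := hv
    rw [PySem.List.mem_pyRange_one] at ha hb
    simp only [] at hv
    rw [PySem.Int.floordiv_eq_ediv_of_pos (pow23_pos _ _)] at hv
    split at hv
    · rename_i hq
      refine ⟨a.toNat, b.toNat, by omega, by omega, hq, ?_⟩
      exact ((Option.some.injEq _ _).mp hv).symm
    · exact absurd hv (by simp)
  · rintro ⟨A, B, hA, hB, hq, rfl⟩
    rw [candOf, List.mem_flatMap]
    refine ⟨(A : Int), by rw [PySem.List.mem_pyRange_one]; omega, ?_⟩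
    rw [List.mem_filterMap]
    refine ⟨(B : Int), by rw [PySem.List.mem_pyRange_one]; omega, ?_⟩
    simp only [Int.toNat_natCast]
    rw [PySem.Int.floordiv_eq_ediv_of_pos (pow23_pos _ _), if_pos hq]

theorem mem_vals (n v : Int) : v ∈ valsOf n ↔ v ∈ candOf n := by
  rw [valsOf, PySem.List.mem_sorted, PySem.Set.mem_ofList]

theorem vals_pos (n v : Int) (hv : v ∈ valsOf n) : 0 < v := by
  rw [mem_vals, mem_cand] at hv
  obtain ⟨A, B, _, _, hq, rfl⟩ := hv
  exact hq

theorem exp_le_31 (A : Nat) (h : (2:Int) ^ A ≤ 2147483648) : A ≤ 31 := by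
  by_contra hc
  have h2 : (2:Int) ^ 32 ≤ 2 ^ A := pow_le_pow_right₀ (by norm_num) (by omega)
  norm_num at h2
  omega

theorem vals_closure (n v : Int) (hdom : Dom_solve n) (hv : v ∈ valsOf n) (h12 : ¬ v < 12) :
    v / 2 ∈ valsOf n ∧ v / 3 ∈ valsOf n ∧ v / 4 ∈ valsOf n := by
  rw [mem_vals, mem_cand] at hv
  obtain ⟨A, B, hA, hB, hq, hveq⟩ := hv
  have hn31 : n ≤ 2147483648 := by
    unfold Dom_solve pvDomInt at hdom
    simp only [decide_eq_true_eq] at hdom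
    omega
  have hdpos := pow23_pos A B
  have h12d : 12 * ((2:Int) ^ A * 3 ^ B) ≤ n :=
    (Int.le_ediv_iff_mul_le hdpos).mp (by omega)
  have hd31 : (2:Int) ^ A * 3 ^ B ≤ 2147483648 := by omega
  have h3B : (1:Int) ≤ 3 ^ B := one_le_pow₀ (by norm_num)
  have h2A : (1:Int) ≤ 2 ^ A := one_le_pow₀ (by norm_num)
  have hA31 : A ≤ 31 := exp_le_31 A (by nlinarith)
  have hB31 : B ≤ 31 := by
    refine exp_le_31 B ?_
    have := pow_le_pow_left₀ (by norm_num : (0:Int) ≤ 2) (by norm_num : (2:Int) ≤ 3) B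
    nlinarith
  have hnn : (0:Int) ≤ n := by omega
  have hvpos : 0 < v := by omega
  refine ⟨?_, ?_, ?_⟩
  · rw [mem_vals, mem_cand]
    refine ⟨A + 1, B, by omega, by omega, ?_, ?_⟩ <;>
      rw [show ((2:Int) ^ (A+1) * 3 ^ B) = (2 ^ A * 3 ^ B) * 2 by ring,
          ← Int.ediv_ediv_eq_ediv_mul (le_of_lt hdpos), ← hveq] <;> omega
  · rw [mem_vals, mem_cand]
    refine ⟨A, B + 1, by omega, by omega, ?_, ?_⟩ <;>
      rw [show ((2:Int) ^ A * 3 ^ (B+1)) = (2 ^ A * 3 ^ B) * 3 by ring,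
          ← Int.ediv_ediv_eq_ediv_mul (le_of_lt hdpos), ← hveq] <;> omega
  · rw [mem_vals, mem_cand]
    refine ⟨A + 2, B, by omega, by omega, ?_, ?_⟩ <;>
      rw [show ((2:Int) ^ (A+2) * 3 ^ B) = (2 ^ A * 3 ^ B) * 4 by ring,
          ← Int.ediv_ediv_eq_ediv_mul (le_of_lt hdpos), ← hveq] <;> omega

theorem fold_correct (l : List Int) (d : PySem.Dict Int Int)
    (hp : l.Pairwise (· < ·))
    (hpos : ∀ v ∈ l, 0 < v)
    (hcl : ∀ v ∈ l, ¬ v < 12 →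
      (v / 2 ∈ l ∨ d.contains (v / 2) = true) ∧ (v / 3 ∈ l ∨ d.contains (v / 3) = true) ∧
      (v / 4 ∈ l ∨ d.contains (v / 4) = true))
    (hd : ∀ u, d.contains u = true → d.getD u 0 = F u) :
    (∀ u ∈ l, (l.foldl stepD d).contains u = true) ∧
    (∀ u, d.contains u = true → (l.foldl stepD d).contains u = true) ∧
    (∀ u, (l.foldl stepD d).contains u = true → (l.foldl stepD d).getD u 0 = F u) := by
  induction l generalizing d with
  | nil => exact ⟨by simp, fun u h => h, hd⟩
  | cons v t ih =>
    rw [List.pairwise_cons] at hp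
    have hvpos : 0 < v := hpos v List.mem_cons_self
    -- the value stored for v is F v
    have hval : (if v < 12 then v
        else d.getD (PySem.Int.floordiv v 2) 0 + d.getD (PySem.Int.floordiv v 3) 0
             + d.getD (PySem.Int.floordiv v 4) 0) = F v := by
      by_cases hv12 : v < 12
      · rw [if_pos hv12, F_small hv12]; omega
      · rw [if_neg hv12]
        obtain ⟨c2, c3, c4⟩ := hcl v List.mem_cons_self hv12
        have resolve : ∀ w : Int, w < v → (w ∈ v :: t ∨ d.contains w = true) →
            d.contains w = true := by
          intro w hw hc
          rcases hc with hm | hc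
          · rcases List.mem_cons.mp hm with rfl | hm
            · omega
            · exact absurd (hp.1 w hm) (by omega)
          · exact hc
        have h2 := resolve (v / 2) (by omega) c2
        have h3 := resolve (v / 3) (by omega) c3
        have h4 := resolve (v / 4) (by omega) c4
        rw [PySem.Int.floordiv_eq_ediv_of_pos (by norm_num),
            PySem.Int.floordiv_eq_ediv_of_pos (by norm_num),
            PySem.Int.floordiv_eq_ediv_of_pos (by norm_num),
            hd _ h2, hd _ h3, hd _ h4]
        conv_rhs => rw [F]
        rw [if_neg hv12]
    have hd1 : ∀ u, (stepD d v).contains u = true → (stepD d v).getD u 0 = F u := by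
      intro u hu
      rw [stepD, PySem.Dict.getD_insert]
      split
      · rename_i h; subst h; exact hval
      · rename_i hne
        rw [stepD, PySem.Dict.contains_insert] at hu
        simp only [Bool.or_eq_true, beq_iff_eq] at hu
        rcases hu with rfl | hu
        · exact absurd rfl hne
        · exact hd u hu
    have hmono : ∀ u, d.contains u = true → (stepD d v).contains u = true := by
      intro u hu
      rw [stepD, PySem.Dict.contains_insert]
      simp [hu]
    have hcl1 : ∀ w ∈ t, ¬ w < 12 →
        (w / 2 ∈ t ∨ (stepD d v).contains (w / 2) = true) ∧
        (w / 3 ∈ t ∨ (stepD d v).contains (w / 3) = true) ∧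
        (w / 4 ∈ t ∨ (stepD d v).contains (w / 4) = true) := by
      intro w hw h12
      obtain ⟨c2, c3, c4⟩ := hcl w (List.mem_cons_of_mem _ hw) h12
      have lift : ∀ x : Int, (x ∈ v :: t ∨ d.contains x = true) →
          (x ∈ t ∨ (stepD d v).contains x = true) := by
        intro x hx
        rcases hx with hm | hc
        · rcases List.mem_cons.mp hm with rfl | hm
          · right; rw [stepD]; exact PySem.Dict.contains_insert_self _ _ _
          · exact Or.inl hm
        · exact Or.inr (hmono x hc)
      exact ⟨lift _ c2, lift _ c3, lift _ c4⟩
    obtain ⟨m1, m2, m3⟩ := ih (stepD d v) hp.2 (fun w hw => hpos w (List.mem_cons_of_mem _ hw)) hcl1 hd1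
    refine ⟨?_, ?_, ?_⟩
    · intro u hu
      rcases List.mem_cons.mp hu with rfl | hu
      · exact m2 u (by rw [stepD]; exact PySem.Dict.contains_insert_self _ _ _)
      · exact m1 u hu
    · intro u hu
      exact m2 u (hmono u hu)
    · exact m3

theorem solve_alt_eq_F (n : Int) (hdom : Dom_solve n) : solve_alt n = F n := by
  by_cases h12 : n < 12
  · rw [solve_alt, if_pos h12, F_small h12]
  · rw [solve_alt_unfold n h12]
    have hcl : ∀ v ∈ valsOf n, ¬ v < 12 →
        (v / 2 ∈ valsOf n ∨ (PySem.Dict.empty : PySem.Dict Int Int).contains (v / 2) = true) ∧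
        (v / 3 ∈ valsOf n ∨ (PySem.Dict.empty : PySem.Dict Int Int).contains (v / 3) = true) ∧
        (v / 4 ∈ valsOf n ∨ (PySem.Dict.empty : PySem.Dict Int Int).contains (v / 4) = true) := by
      intro v hv h
      obtain ⟨c2, c3, c4⟩ := vals_closure n v hdom hv h
      exact ⟨Or.inl c2, Or.inl c3, Or.inl c4⟩
    obtain ⟨m1, _, m3⟩ := fold_correct (valsOf n) PySem.Dict.empty
      (PySem.List.sorted_ofList_pairwise_lt _) (vals_pos n) hcl
      (by intro u hu; rw [PySem.Dict.contains_empty] at hu; exact absurd hu (by simp))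
    have hnmem : n ∈ valsOf n := by
      rw [mem_vals, mem_cand]
      exact ⟨0, 0, by omega, by omega, by simpa using (by omega : (0:Int) < n),
        by norm_num⟩
    exact m3 n (m1 n hnmem)

-- ===== VERDICT (by name: the statement is the Claim_ definition above) =====
theorem solve_spec : Claim_equal_solve := by
  intro n hdom
  unfold Spec_solve solve
  have hA := solveA_correct n PySem.Dict.empty
    (by intro k v hk; simp [PySem.Dict.get?_empty] at hk)
  rw [hA.1, solve_alt_eq_F n hdom]
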